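-- pv_equiv track=rewrite | github.com/pypi-data/pypi-mirror-301 | packages/waterbridge/waterbridge-0.2.0-py3-none-any.whl/waterbridge/3_Nomenclature of waterbridges.py | sort_nucleos
-- ===== SOURCE A (Python) =====
-- def sort_nucleos(coded_ribonucleotides_list):
--     WC_list = [nu for nu in coded_ribonucleotides_list if '(WC)' in nu]
--     HG_list = [nu for nu in coded_ribonucleotides_list if '(HG)' in nu]
--     SG_list = [nu for nu in coded_ribonucleotides_list if '(SG)' in nu]
--     PH_list = [nu for nu in coded_ribonucleotides_list if '(Ph)' in nu]
--     RB_list = [nu for nu in coded_ribonucleotides_list if '(Rb)' in nu]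
--
--     WC_list.sort()
--     HG_list.sort()
--     SG_list.sort()
--     PH_list.sort()
--     RB_list.sort()
--
--     final_parts = []
--
--     # Add parts in the specified order
--     if WC_list: final_parts.append('|'.join(WC_list))
--     if HG_list: final_parts.append('|'.join(HG_list))
--     if SG_list: final_parts.append('|'.join(SG_list))
--     if PH_list: final_parts.append('|'.join(PH_list))
--     if RB_list: final_parts.append('|'.join(RB_list))
--
--     final_string = '|'.join(final_parts)
--     return final_string
-- ===== SOURCE B (Python) =====
-- def sort_nucleos(coded_ribonucleotides_list):
--     # decorate-sort-undecorate: tag each matching string with its group's rank,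
--     # sort the (rank, string) pairs once, and join -- no buckets, no per-bucket joins
--     tags = ['(WC)', '(HG)', '(SG)', '(Ph)', '(Rb)']
--     pairs = [(i, nu) for nu in coded_ribonucleotides_list
--              for i, tag in enumerate(tags) if tag in nu]
--     pairs.sort()
--     return '|'.join(nu for _, nu in pairs)
-- ===== Notes on version B (the rewrite author's own statement) =====
-- stated objective: alternative
-- what changed: A filters the list five times into five buckets, sorts each bucket, joins each bucket and joins the non-empty parts; B decorates each matching string with its tag's rank, sorts the (rank, string) pairs once lexicographically, and joins the undecorated result in a single join.
import Mathlib
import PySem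

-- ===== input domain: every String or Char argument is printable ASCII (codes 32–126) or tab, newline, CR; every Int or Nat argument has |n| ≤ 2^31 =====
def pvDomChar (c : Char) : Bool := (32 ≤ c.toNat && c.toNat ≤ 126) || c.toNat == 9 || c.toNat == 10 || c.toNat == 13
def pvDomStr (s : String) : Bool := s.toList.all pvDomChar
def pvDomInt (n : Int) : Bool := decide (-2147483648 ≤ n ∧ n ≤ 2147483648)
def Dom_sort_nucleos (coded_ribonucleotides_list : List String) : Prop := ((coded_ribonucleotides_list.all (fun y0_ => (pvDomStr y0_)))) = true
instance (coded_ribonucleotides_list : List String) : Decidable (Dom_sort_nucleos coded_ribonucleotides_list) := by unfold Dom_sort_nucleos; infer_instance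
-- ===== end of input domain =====

-- B replaces A's five bucket lists (filter, per-bucket sort, per-bucket join) by a single
-- decorate-sort-undecorate: tag each matching string with its group rank, sort the
-- (rank, string) pairs once, join once (objective: alternative).

-- ===== PORT A =====
def sort_nucleos (coded_ribonucleotides_list : List String) : String :=
  -- the five filter comprehensions, then each list.sort() (= sorted with identity key)
  let WC_list := PySem.List.sorted (coded_ribonucleotides_list.filter (fun nu => PySem.Str.isIn "(WC)" nu)) (fun x => x) false
  let HG_list := PySem.List.sorted (coded_ribonucleotides_list.filter (fun nu => PySem.Str.isIn "(HG)" nu)) (fun x => x) false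
  let SG_list := PySem.List.sorted (coded_ribonucleotides_list.filter (fun nu => PySem.Str.isIn "(SG)" nu)) (fun x => x) false
  let PH_list := PySem.List.sorted (coded_ribonucleotides_list.filter (fun nu => PySem.Str.isIn "(Ph)" nu)) (fun x => x) false
  let RB_list := PySem.List.sorted (coded_ribonucleotides_list.filter (fun nu => PySem.Str.isIn "(Rb)" nu)) (fun x => x) false
  let final_parts : List String := []
  let final_parts := if WC_list ≠ [] then final_parts ++ [PySem.Str.join "|" WC_list] else final_parts
  let final_parts := if HG_list ≠ [] then final_parts ++ [PySem.Str.join "|" HG_list] else final_parts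
  let final_parts := if SG_list ≠ [] then final_parts ++ [PySem.Str.join "|" SG_list] else final_parts
  let final_parts := if PH_list ≠ [] then final_parts ++ [PySem.Str.join "|" PH_list] else final_parts
  let final_parts := if RB_list ≠ [] then final_parts ++ [PySem.Str.join "|" RB_list] else final_parts
  PySem.Str.join "|" final_parts

-- ===== PORT B =====
-- tags = ['(WC)', '(HG)', '(SG)', '(Ph)', '(Rb)']
def pvTags : List String := ["(WC)", "(HG)", "(SG)", "(Ph)", "(Rb)"]

def sort_nucleos_alt (coded_ribonucleotides_list : List String) : String :=
  -- pairs = [(i, nu) for nu in … for i, tag in enumerate(tags) if tag in nu]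
  let pairs : List (Int × String) :=
    coded_ribonucleotides_list.flatMap (fun nu =>
      ((PySem.List.enumerate pvTags).filter (fun it => PySem.Str.isIn it.2 nu)).map
        (fun it => (it.1, nu)))
  -- pairs.sort()  (tuples compare lexicographically: sorted2 with fst/snd keys)
  let pairs := PySem.List.sorted2 pairs Prod.fst Prod.snd false
  -- '|'.join(nu for _, nu in pairs)
  PySem.Str.join "|" (pairs.map Prod.snd)

-- ===== PRECONDITION & SPEC =====
def Spec_sort_nucleos (coded_ribonucleotides_list : List String) (out : String) : Prop := out = sort_nucleos_alt coded_ribonucleotides_list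
instance (coded_ribonucleotides_list : List String) (out : String) : Decidable (Spec_sort_nucleos coded_ribonucleotides_list out) := by unfold Spec_sort_nucleos; infer_instance

-- ===== CLAIM (what is proved, stated in full; the proofs are below) =====
def Claim_equal_sort_nucleos : Prop := ∀ (coded_ribonucleotides_list : List String), Dom_sort_nucleos coded_ribonucleotides_list → Spec_sort_nucleos coded_ribonucleotides_list (sort_nucleos coded_ribonucleotides_list)

-- ===== LEMMAS AND PROOFS =====

-- proof-only abbreviation: bucket t l = sorted([nu for nu in l if t in nu])
def pvBucket (t : String) (l : List String) : List String :=
  PySem.List.sorted (l.filter (fun nu => PySem.Str.isIn t nu)) (fun x => x) false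

-- B's decorated-and-sorted pair list, written as the five sorted buckets side by side
def pvDecor (l : List String) : List (Int × String) :=
  (pvBucket "(WC)" l).map ((0 : Int), ·) ++ ((pvBucket "(HG)" l).map ((1 : Int), ·) ++
  ((pvBucket "(SG)" l).map ((2 : Int), ·) ++ ((pvBucket "(Ph)" l).map ((3 : Int), ·) ++
  (pvBucket "(Rb)" l).map ((4 : Int), ·))))

lemma pv_enum : PySem.List.enumerate pvTags =
    [((0 : Int), "(WC)"), (1, "(HG)"), (2, "(SG)"), (3, "(Ph)"), (4, "(Rb)")] := by decide

-- the inner comprehension for one nu, written out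
lemma pv_g_eq (nu : String) :
    ((PySem.List.enumerate pvTags).filter (fun it => PySem.Str.isIn it.2 nu)).map
        (fun it => (it.1, nu)) =
      (if PySem.Str.isIn "(WC)" nu then [(((0 : Int)), nu)] else []) ++
      ((if PySem.Str.isIn "(HG)" nu then [((1 : Int), nu)] else []) ++
      ((if PySem.Str.isIn "(SG)" nu then [((2 : Int), nu)] else []) ++
      ((if PySem.Str.isIn "(Ph)" nu then [((3 : Int), nu)] else []) ++
      (if PySem.Str.isIn "(Rb)" nu then [((4 : Int), nu)] else [])))) := by
  rw [pv_enum]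
  simp only [List.filter_cons, List.filter_nil]
  split_ifs <;> simp_all

-- interleaving five appended blocks with five others is a permutation
lemma pv_interleave (a0 a1 a2 a3 a4 b0 b1 b2 b3 b4 : List (Int × String)) :
    ((a0 ++ (a1 ++ (a2 ++ (a3 ++ a4)))) ++ (b0 ++ (b1 ++ (b2 ++ (b3 ++ b4))))).Perm
      ((a0 ++ b0) ++ ((a1 ++ b1) ++ ((a2 ++ b2) ++ ((a3 ++ b3) ++ (a4 ++ b4))))) := by
  rw [List.perm_iff_count]
  intro x
  simp only [List.count_append]
  omega

-- the undecorated flatMap is a permutation of the five (unsorted) decorated buckets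
lemma pv_flatMap_perm (l : List String) :
    (l.flatMap (fun nu =>
      ((PySem.List.enumerate pvTags).filter (fun it => PySem.Str.isIn it.2 nu)).map
        (fun it => (it.1, nu)))).Perm
    ((l.filter (fun nu => PySem.Str.isIn "(WC)" nu)).map ((0 : Int), ·) ++
     ((l.filter (fun nu => PySem.Str.isIn "(HG)" nu)).map ((1 : Int), ·) ++
     ((l.filter (fun nu => PySem.Str.isIn "(SG)" nu)).map ((2 : Int), ·) ++
     ((l.filter (fun nu => PySem.Str.isIn "(Ph)" nu)).map ((3 : Int), ·) ++
     (l.filter (fun nu => PySem.Str.isIn "(Rb)" nu)).map ((4 : Int), ·))))) := by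
  induction l with
  | nil => simp [pv_enum]
  | cons nu t ih =>
    rw [List.flatMap_cons, pv_g_eq]
    refine (ih.append_left _).trans ((pv_interleave _ _ _ _ _ _ _ _ _ _).trans ?_)
    simp only [List.filter_cons]
    split_ifs <;> simp

-- each bucket, decorated with a constant rank, is lexicographically ordered
lemma pv_pair_bucket (i : Int) (b : List String) (hb : b.Pairwise (· ≤ ·)) :
    (b.map ((i : Int), ·)).Pairwise
      (fun a b : Int × String => (toLex a : Lex (Int × String)) ≤ toLex b) := by
  rw [List.pairwise_map]
  refine List.Pairwise.imp ?_ hb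
  intro a c h
  exact Prod.Lex.le_iff.mpr (Or.inr ⟨rfl, h⟩)

-- a rank-i pair precedes a rank-j pair whenever i < j
lemma pv_pair_cross {i j : Int} (hij : i < j) {x y : Int × String} {bx by' : List String}
    (hx : x ∈ bx.map ((i : Int), ·)) (hy : y ∈ by'.map ((j : Int), ·)) :
    (toLex x : Lex (Int × String)) ≤ toLex y := by
  obtain ⟨sx, -, rfl⟩ := List.mem_map.mp hx
  obtain ⟨sy, -, rfl⟩ := List.mem_map.mp hy
  exact Prod.Lex.le_iff.mpr (Or.inl hij)

-- sorted2 on pairs with fst/snd keys is sorted with the lexicographic key toLex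
lemma pv_sorted2_eq_sorted_toLex (xs : List (Int × String)) :
    PySem.List.sorted2 xs Prod.fst Prod.snd false =
      PySem.List.sorted xs (fun p => (toLex p : Lex (Int × String))) false := by
  have hbf : (fun a b : Int × String =>
        decide (a.1 < b.1) || (!decide (b.1 < a.1) && decide (a.2 < b.2))) =
      (fun a b : Int × String =>
        decide ((toLex a : Lex (Int × String)) < toLex b)) := by
    funext a b
    by_cases h : a.1 < b.1
    · simp [h, Prod.Lex.lt_iff]
    · by_cases h2 : b.1 < a.1
      · simp [h, h2.ne', Prod.Lex.lt_iff]
        exact fun hle => absurd hle (not_le.mpr h2)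
      · have he : a.1 = b.1 := le_antisymm (not_lt.mp h2) (not_lt.mp h)
        simp [he, Prod.Lex.lt_iff]
  show xs.foldl (fun acc x => PySem.List.insertBy (fun a b : Int × String =>
        decide (a.1 < b.1) || (!decide (b.1 < a.1) && decide (a.2 < b.2))) x acc) [] =
      xs.foldl (fun acc x => PySem.List.insertBy (fun a b : Int × String =>
        decide ((toLex a : Lex (Int × String)) < toLex b)) x acc) []
  rw [hbf]

-- B's sorted pair list IS the five sorted buckets in tag order
lemma pv_sorted_pairs_eq (l : List String) :
    PySem.List.sorted2
      (l.flatMap (fun nu =>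
        ((PySem.List.enumerate pvTags).filter (fun it => PySem.Str.isIn it.2 nu)).map
          (fun it => (it.1, nu))))
      Prod.fst Prod.snd false = pvDecor l := by
  rw [pv_sorted2_eq_sorted_toLex]
  apply PySem.List.eq_of_perm_of_pairwise_le_of_injective
    (fun p : Int × String => (toLex p : Lex (Int × String))) (fun _ _ h => h)
  · -- permutation: sorted ~ flatMap ~ unsorted buckets ~ sorted buckets
    refine (PySem.List.sorted_perm _ _ _).trans ((pv_flatMap_perm l).trans ?_)
    unfold pvDecor pvBucket
    exact List.Perm.append (((PySem.List.sorted_perm _ _ _).map _).symm) <|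
      List.Perm.append (((PySem.List.sorted_perm _ _ _).map _).symm) <|
      List.Perm.append (((PySem.List.sorted_perm _ _ _).map _).symm) <|
      List.Perm.append (((PySem.List.sorted_perm _ _ _).map _).symm)
        (((PySem.List.sorted_perm _ _ _).map _).symm)
  · exact PySem.List.sorted_pairwise _ _
  · -- the five sorted buckets side by side are lexicographically ordered
    unfold pvDecor
    have hb : ∀ t, (pvBucket t l).Pairwise (fun a b : String => a ≤ b) := fun t =>
      PySem.List.sorted_pairwise _ (fun x : String => x)
    refine List.pairwise_append.mpr ⟨pv_pair_bucket _ _ (hb _),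
      List.pairwise_append.mpr ⟨pv_pair_bucket _ _ (hb _),
        List.pairwise_append.mpr ⟨pv_pair_bucket _ _ (hb _),
          List.pairwise_append.mpr ⟨pv_pair_bucket _ _ (hb _), pv_pair_bucket _ _ (hb _),
            fun x hx y hy => pv_pair_cross (by norm_num) hx hy⟩, ?_⟩, ?_⟩, ?_⟩
    · intro x hx y hy
      simp only [List.mem_append] at hy
      rcases hy with hy | hy <;> exact pv_pair_cross (by norm_num) hx hy
    · intro x hx y hy
      simp only [List.mem_append] at hy
      rcases hy with hy | hy | hy <;> exact pv_pair_cross (by norm_num) hx hy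
    · intro x hx y hy
      simp only [List.mem_append] at hy
      rcases hy with hy | hy | hy | hy <;> exact pv_pair_cross (by norm_num) hx hy

-- join of A ++ B, both non-empty part lists (Chars level)
lemma pv_join_append (sep : List Char) (A B : List (List Char)) (hA : A ≠ []) (hB : B ≠ []) :
    PySem.Chars.join sep (A ++ B) =
      PySem.Chars.join sep A ++ sep ++ PySem.Chars.join sep B := by
  match A with
  | [] => exact absurd rfl hA
  | [x] =>
    obtain ⟨b, bs, rfl⟩ := List.exists_cons_of_ne_nil hB
    simp [PySem.Chars.join_singleton, PySem.Chars.join_cons_cons]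
  | x :: y :: ys =>
    rw [List.cons_append, List.cons_append, PySem.Chars.join_cons_cons,
      PySem.Chars.join_cons_cons, ← List.cons_append,
      pv_join_append sep (y :: ys) B (by simp) hB]
    simp [List.append_assoc]

-- join of the non-empty parts, each itself joined, = join of everything (Chars level)
lemma pv_chars_join_flatten (sep : List Char) (ls : List (List (List Char))) :
    PySem.Chars.join sep ((ls.filter (fun b => b ≠ [])).map (PySem.Chars.join sep)) =
      PySem.Chars.join sep ls.flatten := by
  induction ls with
  | nil => rfl
  | cons h t ih =>
    by_cases hh : h = []
    · subst hh; simpa using ih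
    · rw [List.filter_cons_of_pos (by simpa using hh), List.flatten_cons, List.map_cons]
      by_cases hf : t.flatten = []
      · have hft : t.filter (fun b => b ≠ []) = [] := by
          rw [List.filter_eq_nil_iff]
          intro b hb
          simpa using (List.flatten_eq_nil_iff.mp hf) b hb
        rw [hft, hf, List.append_nil]
        exact PySem.Chars.join_singleton _ _
      · have hft : (t.filter (fun b => b ≠ [])).map (PySem.Chars.join sep) ≠ [] := by
          intro hmap
          apply hf
          rw [List.flatten_eq_nil_iff]
          intro b hb
          by_contra hbne
          have hbm : b ∈ t.filter (fun b => b ≠ []) :=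
            List.mem_filter.mpr ⟨hb, by simpa using hbne⟩
          rw [List.map_eq_nil_iff.mp hmap] at hbm
          simp at hbm
        obtain ⟨m, ms, hm⟩ := List.exists_cons_of_ne_nil hft
        rw [hm, PySem.Chars.join_cons_cons, ← hm, ih,
          pv_join_append sep h t.flatten hh hf]

-- String-level corollary, shaped for the two ports
lemma pv_join_flatten (ls : List (List String)) :
    PySem.Str.join "|" ((ls.filter (fun b => b ≠ [])).map (PySem.Str.join "|")) =
      PySem.Str.join "|" ls.flatten := by
  have h := pv_chars_join_flatten "|".toList (ls.map (List.map String.toList))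
  apply String.toList_injective
  rw [PySem.Str.toList_join, PySem.Str.toList_join]
  rw [List.filter_map] at h
  simpa [List.map_map, Function.comp_def, PySem.Str.toList_join, List.map_flatten,
    List.map_eq_nil_iff] using h

-- the Python if-chain over five given buckets, joined, = join of all five concatenated
lemma pv_whole (b0 b1 b2 b3 b4 : List String) :
    PySem.Str.join "|"
      (let final_parts : List String := []
       let final_parts := if b0 ≠ [] then final_parts ++ [PySem.Str.join "|" b0] else final_parts
       let final_parts := if b1 ≠ [] then final_parts ++ [PySem.Str.join "|" b1] else final_parts
       let final_parts := if b2 ≠ [] then final_parts ++ [PySem.Str.join "|" b2] else final_parts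
       let final_parts := if b3 ≠ [] then final_parts ++ [PySem.Str.join "|" b3] else final_parts
       let final_parts := if b4 ≠ [] then final_parts ++ [PySem.Str.join "|" b4] else final_parts
       final_parts) =
    PySem.Str.join "|" ([b0, b1, b2, b3, b4].flatten) := by
  rw [← pv_join_flatten]
  congr 1
  by_cases h0 : b0 = [] <;> by_cases h1 : b1 = [] <;> by_cases h2 : b2 = [] <;>
    by_cases h3 : b3 = [] <;> by_cases h4 : b4 = [] <;>
    simp [h0, h1, h2, h3, h4]

-- ===== VERDICT (by name: the statement is the Claim_ definition above) =====
theorem sort_nucleos_spec : Claim_equal_sort_nucleos := by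
  intro l _
  show sort_nucleos l = sort_nucleos_alt l
  have hA : sort_nucleos l = PySem.Str.join "|"
      (let final_parts : List String := []
       let final_parts := if pvBucket "(WC)" l ≠ [] then final_parts ++ [PySem.Str.join "|" (pvBucket "(WC)" l)] else final_parts
       let final_parts := if pvBucket "(HG)" l ≠ [] then final_parts ++ [PySem.Str.join "|" (pvBucket "(HG)" l)] else final_parts
       let final_parts := if pvBucket "(SG)" l ≠ [] then final_parts ++ [PySem.Str.join "|" (pvBucket "(SG)" l)] else final_parts
       let final_parts := if pvBucket "(Ph)" l ≠ [] then final_parts ++ [PySem.Str.join "|" (pvBucket "(Ph)" l)] else final_parts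
       let final_parts := if pvBucket "(Rb)" l ≠ [] then final_parts ++ [PySem.Str.join "|" (pvBucket "(Rb)" l)] else final_parts
       final_parts) := rfl
  have hB : sort_nucleos_alt l = PySem.Str.join "|"
      ((PySem.List.sorted2
        (l.flatMap (fun nu =>
          ((PySem.List.enumerate pvTags).filter (fun it => PySem.Str.isIn it.2 nu)).map
            (fun it => (it.1, nu))))
        Prod.fst Prod.snd false).map Prod.snd) := rfl
  have hA2 : sort_nucleos l = PySem.Str.join "|"
      ([pvBucket "(WC)" l, pvBucket "(HG)" l, pvBucket "(SG)" l, pvBucket "(Ph)" l,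
        pvBucket "(Rb)" l].flatten) := by
    rw [hA]; exact pv_whole _ _ _ _ _
  have hB2 : sort_nucleos_alt l = PySem.Str.join "|" ((pvDecor l).map Prod.snd) := by
    rw [hB, pv_sorted_pairs_eq]
  rw [hA2, hB2]
  have hdec : (pvDecor l).map Prod.snd =
      pvBucket "(WC)" l ++ (pvBucket "(HG)" l ++ (pvBucket "(SG)" l ++
        (pvBucket "(Ph)" l ++ pvBucket "(Rb)" l))) := by
    simp [pvDecor]
  rw [hdec]
  simp
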